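-- pv_equiv track=rewrite | github.com/pypi-data/pypi-mirror-403 | packages/hzgt/hzgt-2026.1.30.tar.gz/hzgt-2026.1.30/hzgt/core/ipss.py | __normalize_ipv6
-- ===== SOURCE A (Python) =====
-- def __normalize_ipv6(ipv6_str: str) -> str:
--     """
--     标准化ipv6地址（RFC 5952格式）
--
--     1. 小写十六进制字符
--     2. 压缩连续的零段（使用::）
--     3. 移除前导零
--     4. 处理ipv映射地址
--
--     参数:
--         ipv6_str (str): 原始ipv6地址字符串
--
--     返回:
--         str: 标准化后的ipv6地址
--     """
--     # 如果包含ipv映射部分（::ffff:192.168.1.1）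
--     if '.' in ipv6_str and '::' in ipv6_str:
--         parts = ipv6_str.split(':')
--         ipv4_part = parts[-1]
--         return '::ffff:' + ipv4_part
--
--     # 移除所有前导零并小写
--     segments = []
--     for segment in ipv6_str.split(':'):
--         if segment == '':
--             segments.append('')
--         else:
--             # 移除前导零, 但保留至少一个字符
--             segment = segment.lstrip('0') or '0'
--             segments.append(segment.lower())
--
--     # 重建地址
--     normalized = ':'.join(segments)
--
--     # 压缩最长的连续零段（但避免压缩单个零段）
--     best_start = -1
--     best_length = 0
--     current_start = -1
--     current_length = 0
--
--     # 查找最长的连续空段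
--     for i, seg in enumerate(segments):
--         if seg == '' or seg == '0':
--             if current_start == -1:
--                 current_start = i
--             current_length += 1
--         else:
--             if current_length > best_length:
--                 best_start = current_start
--                 best_length = current_length
--             current_start = -1
--             current_length = 0
--
--     # 检查末尾的连续零
--     if current_length > best_length:
--         best_start = current_start
--         best_length = current_length
--
--     # 如果有需要压缩的段
--     if best_length > 1:
--         # 构建压缩后的地址
--         before = ':'.join(segments[:best_start])
--         after = ':'.join(segments[best_start + best_length:])
--
--         # 处理开头和结尾的特殊情况
--         if not before and not after:
--             return "::"
--         elif not before:
--             return "::" + after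
--         elif not after:
--             return before + "::"
--         else:
--             return before + "::" + after
--
--     return normalized
-- ===== SOURCE B (Python) =====
-- def __normalize_ipv6(ipv6_str: str) -> str:
--     # IPv4-mapped early branch, identical behaviour
--     if '.' in ipv6_str and '::' in ipv6_str:
--         return '::ffff:' + ipv6_str.split(':')[-1]
--
--     segments = ['' if seg == '' else (seg.lstrip('0') or '0').lower()
--                 for seg in ipv6_str.split(':')]
--
--     # build the table of ALL maximal runs of compressible segments as (start, length)
--     runs = []
--     i, rest = 0, segments
--     while rest:
--         if rest[0] in ('', '0'):
--             k = 1
--             while k < len(rest) and rest[k] in ('', '0'):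
--                 k += 1
--             runs.append((i, k))
--             i, rest = i + k, rest[k:]
--         else:
--             i, rest = i + 1, rest[1:]
--
--     # pick the first run of maximal length
--     best_start, best_length = -1, 0
--     for start, length in runs:
--         if length > best_length:
--             best_start, best_length = start, length
--
--     if best_length > 1:
--         before = ':'.join(segments[:best_start])
--         after = ':'.join(segments[best_start + best_length:])
--         if not before:
--             return '::' + after
--         if not after:
--             return before + '::'
--         return before + '::' + after
--
--     return ':'.join(segments)
-- ===== Notes on version B (the rewrite author's own statement) =====
-- stated objective: alternative
-- what changed: Replaces A's single-pass best/current zero-run tracker (4-variable state machine with an end-of-list fixup) by first building the table of all maximal compressible runs as (start,length) pairs and then picking the first run of maximal length; the ipv4-mapped branch, segment cleanup and rebuild are unchanged.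
import Mathlib
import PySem

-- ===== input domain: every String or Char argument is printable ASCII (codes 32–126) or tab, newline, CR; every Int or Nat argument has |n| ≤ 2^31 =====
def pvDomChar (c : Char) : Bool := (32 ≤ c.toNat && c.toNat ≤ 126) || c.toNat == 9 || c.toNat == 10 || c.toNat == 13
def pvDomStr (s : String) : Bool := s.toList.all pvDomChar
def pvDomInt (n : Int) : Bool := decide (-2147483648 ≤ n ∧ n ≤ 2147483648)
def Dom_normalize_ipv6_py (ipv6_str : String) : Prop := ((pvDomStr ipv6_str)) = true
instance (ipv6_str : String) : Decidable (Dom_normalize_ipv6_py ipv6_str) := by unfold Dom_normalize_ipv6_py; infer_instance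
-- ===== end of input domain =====

-- B replaces A's single-pass best/current zero-run tracker by a run table (all maximal
-- compressible runs as (start,length)) plus a first-max pick: alternative decomposition, same cost.

-- ===== PORT A =====
-- exact port of segment.lstrip('0') (single strip char)
def pvLstrip0A (s : String) : String := String.mk (s.toList.dropWhile (fun c => c == '0'))

-- A's loop body over enumerate(segments): state (best_start, best_length, current_start, current_length)
def pvStepA (st : Int × Int × Int × Int) (p : Int × String) : Int × Int × Int × Int :=
  let (bs, bl, cs, cl) := st
  if p.2 == "" || p.2 == "0" then
    let cs' := if cs == -1 then p.1 else cs
    (bs, bl, cs', cl + 1)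
  else
    if cl > bl then (cs, cl, -1, 0) else (bs, bl, -1, 0)

def normalize_ipv6_py (ipv6_str : String) : String :=
  if PySem.Str.isIn "." ipv6_str && PySem.Str.isIn "::" ipv6_str then
    let parts := (PySem.Str.split? ipv6_str ":").getD []
    -- split always returns a nonempty list, so parts[-1] never raises
    "::ffff:" ++ (PySem.List.pyGet? parts (-1)).getD ""
  else
    let segments := ((PySem.Str.split? ipv6_str ":").getD []).foldl
      (fun segments segment =>
        if segment == "" then segments ++ [""]
        else
          let segment := (fun t => if t == "" then "0" else t) (pvLstrip0A segment)
          segments ++ [PySem.Str.lower segment]) []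
    let normalized := PySem.Str.join ":" segments
    let st := (PySem.List.enumerate segments).foldl pvStepA ((-1 : Int), (0 : Int), (-1 : Int), (0 : Int))
    let best_start := if st.2.2.2 > st.2.1 then st.2.2.1 else st.1
    let best_length := if st.2.2.2 > st.2.1 then st.2.2.2 else st.2.1
    if best_length > 1 then
      let before := PySem.Str.join ":" (PySem.List.slice segments none (some best_start))
      let after := PySem.Str.join ":" (PySem.List.slice segments (some (best_start + best_length)) none)
      if before == "" && after == "" then "::"
      else if before == "" then "::" ++ after
      else if after == "" then before ++ "::"
      else before ++ "::" ++ after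
    else normalized

-- ===== PORT B =====
def pvIsZeroSeg (s : String) : Bool := s == "" || s == "0"

-- seg.lstrip('0') ported inline as dropWhile (exact: single strip char)
def pvCleanB (seg : String) : String :=
  if seg == "" then ""
  else
    let t := String.mk (seg.toList.dropWhile (fun c => c == '0'))
    PySem.Str.lower (if t == "" then "0" else t)

-- inner while: number of leading compressible segments
def pvZrun : List String → Nat
  | [] => 0
  | s :: rest => if pvIsZeroSeg s then pvZrun rest + 1 else 0

-- outer while: table of all maximal compressible runs as (start, length)
def pvRuns (i : Int) : List String → List (Int × Int)
  | [] => []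
  | s :: rest =>
    if pvIsZeroSeg s then
      (i, (pvZrun rest : Int) + 1) :: pvRuns (i + (pvZrun rest : Int) + 1) (rest.drop (pvZrun rest))
    else pvRuns (i + 1) rest
termination_by l => l.length
decreasing_by all_goals (simp [List.length_drop]; try omega)

def pvBestStep (b : Int × Int) (r : Int × Int) : Int × Int := if r.2 > b.2 then r else b

def normalize_ipv6_py_alt (ipv6_str : String) : String :=
  if PySem.Str.isIn "." ipv6_str && PySem.Str.isIn "::" ipv6_str then
    let parts := (PySem.Str.split? ipv6_str ":").getD []
    -- split always returns a nonempty list, so parts[-1] never raises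
    "::ffff:" ++ (PySem.List.pyGet? parts (-1)).getD ""
  else
    let segments := ((PySem.Str.split? ipv6_str ":").getD []).map pvCleanB
    let best := (pvRuns 0 segments).foldl pvBestStep ((-1 : Int), (0 : Int))
    if best.2 > 1 then
      let before := PySem.Str.join ":" (PySem.List.slice segments none (some best.1))
      let after := PySem.Str.join ":" (PySem.List.slice segments (some (best.1 + best.2)) none)
      if before == "" then "::" ++ after
      else if after == "" then before ++ "::"
      else before ++ "::" ++ after
    else PySem.Str.join ":" segments

-- ===== PRECONDITION & SPEC =====
def Spec_normalize_ipv6_py (ipv6_str : String) (out : String) : Prop := out = normalize_ipv6_py_alt ipv6_str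
instance (ipv6_str : String) (out : String) : Decidable (Spec_normalize_ipv6_py ipv6_str out) := by unfold Spec_normalize_ipv6_py; infer_instance

-- ===== CLAIM (what is proved, stated in full; the proofs are below) =====
def Claim_equal_normalize_ipv6_py : Prop := ∀ (ipv6_str : String), Dom_normalize_ipv6_py ipv6_str → Spec_normalize_ipv6_py ipv6_str (normalize_ipv6_py ipv6_str)

-- ===== LEMMAS AND PROOFS =====

-- A's append-loop builds the map
theorem pv_foldl_append_map {α β : Type} (f : α → β) :
    ∀ (l : List α) (acc : List β), l.foldl (fun a x => a ++ [f x]) acc = acc ++ l.map f := by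
  intro l
  induction l with
  | nil => intro acc; simp
  | cons x xs ih => intro acc; simp [ih]

theorem pvZrun_eq_takeWhile (l : List String) : pvZrun l = (l.takeWhile pvIsZeroSeg).length := by
  induction l with
  | nil => rfl
  | cons s rest ih =>
    by_cases h : pvIsZeroSeg s = true
    · simp [pvZrun, List.takeWhile_cons, h, ih]
    · simp [pvZrun, List.takeWhile_cons, Bool.eq_false_iff.mpr h, h]

-- a block of compressible segments only bumps current_length
theorem pv_zblock (zs : List String) (hz : ∀ s ∈ zs, pvIsZeroSeg s = true) :
    ∀ (j bs bl cs cl : Int), cs ≠ -1 →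
    (PySem.List.enumerate zs j).foldl pvStepA (bs, bl, cs, cl) = (bs, bl, cs, cl + zs.length) := by
  induction zs with
  | nil => intro j bs bl cs cl _; simp [PySem.List.enumerate_nil]
  | cons s rest ih =>
    intro j bs bl cs cl hcs
    have hs : pvIsZeroSeg s = true := hz s (by simp)
    have hrest : ∀ x ∈ rest, pvIsZeroSeg x = true := fun x hx => hz x (by simp [hx])
    have hstep : pvStepA (bs, bl, cs, cl) (j, s) = (bs, bl, cs, cl + 1) := by
      simp only [pvStepA, pvIsZeroSeg] at hs ⊢
      simp [hs, beq_iff_eq, hcs]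
    rw [PySem.List.enumerate_cons, List.foldl_cons, hstep, ih hrest (j + 1) bs bl cs (cl + 1) hcs]
    simp; omega

-- the fixup after A's loop, as a function of the final state
def pvFinish (st : Int × Int × Int × Int) : Int × Int :=
  ((if st.2.2.2 > st.2.1 then st.2.2.1 else st.1), (if st.2.2.2 > st.2.1 then st.2.2.2 else st.2.1))

theorem pvStepA_zero (bs bl cs cl i : Int) (s : String) (hs : pvIsZeroSeg s = true) :
    pvStepA (bs, bl, cs, cl) (i, s) = (bs, bl, (if cs == -1 then i else cs), cl + 1) := by
  simp only [pvIsZeroSeg] at hs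
  simp [pvStepA, hs]

theorem pvStepA_nonzero (bs bl cs cl i : Int) (s : String) (hs : pvIsZeroSeg s = false) :
    pvStepA (bs, bl, cs, cl) (i, s) = if cl > bl then (cs, cl, -1, 0) else (bs, bl, -1, 0) := by
  simp only [pvIsZeroSeg, Bool.or_eq_false_iff] at hs
  simp [pvStepA, hs.1, hs.2]

theorem pv_drop_zrun (l : List String) : l.drop (pvZrun l) = l.dropWhile pvIsZeroSeg := by
  induction l with
  | nil => rfl
  | cons s rest ih =>
    by_cases h : pvIsZeroSeg s = true
    · simp [pvZrun, h, List.dropWhile_cons, ih]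
    · simp [pvZrun, h, List.dropWhile_cons, Bool.eq_false_iff.mpr h]

-- main invariant: A's tracker + final fixup = first-max over the run table
theorem pv_main : ∀ (n : Nat) (segs : List String), segs.length ≤ n →
    ∀ (i bs bl : Int), 0 ≤ i → 0 ≤ bl →
    pvFinish ((PySem.List.enumerate segs i).foldl pvStepA (bs, bl, -1, 0))
      = (pvRuns i segs).foldl pvBestStep (bs, bl) := by
  intro n
  induction n with
  | zero =>
    intro segs hlen i bs bl hi hbl
    have hnil : segs = [] := List.eq_nil_of_length_eq_zero (by omega)
    subst hnil
    simp [PySem.List.enumerate_nil, pvRuns, pvFinish, show ¬((0:Int) > bl) from by omega]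
  | succ n ih =>
    intro segs hlen i bs bl hi hbl
    cases segs with
    | nil => simp [PySem.List.enumerate_nil, pvRuns, pvFinish, show ¬((0:Int) > bl) from by omega]
    | cons s rest =>
      by_cases hz : pvIsZeroSeg s = true
      · -- compressible head: a whole run follows
        set zs := rest.takeWhile pvIsZeroSeg with hzs
        set rest' := rest.dropWhile pvIsZeroSeg with hrest'
        have hzlen : pvZrun rest = zs.length := pvZrun_eq_takeWhile rest
        have hdrop : rest.drop (pvZrun rest) = rest' := pv_drop_zrun rest
        have hsplit : zs ++ rest' = rest := List.takeWhile_append_dropWhile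
        have hzall : ∀ x ∈ zs, pvIsZeroSeg x = true := fun x hx => List.mem_takeWhile_imp hx
        have hstep1 : pvStepA (bs, bl, -1, 0) (i, s) = (bs, bl, i, 1) := by
          rw [pvStepA_zero _ _ _ _ _ _ hz]; simp
        have hRuns : pvRuns i (s :: rest)
            = (i, (zs.length : Int) + 1) :: pvRuns (i + (zs.length : Int) + 1) rest' := by
          rw [pvRuns]; simp only [hz, if_true]; rw [hdrop, hzlen]
        have hne : (i : Int) ≠ -1 := by omega
        -- fold over the zero block
        have hblock := pv_zblock zs hzall (i + 1) bs bl i 1 hne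
        rw [PySem.List.enumerate_cons, List.foldl_cons, hstep1, hRuns, List.foldl_cons, ← hsplit,
            PySem.List.enumerate_append, List.foldl_append, hblock]
        cases hcase : rest' with
        | nil =>
          simp only [PySem.List.enumerate_nil, List.foldl_nil, pvRuns, pvFinish, pvBestStep]
          split_ifs <;> simp <;> omega
        | cons r rs =>
          have hr : pvIsZeroSeg r = false := by
            have hcase' : rest.dropWhile pvIsZeroSeg = r :: rs := by rw [← hrest']; exact hcase
            have hw : rest.dropWhile pvIsZeroSeg ≠ [] := by simp [hcase']
            have := List.head_dropWhile_not pvIsZeroSeg (l := rest) hw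
            simpa [hcase'] using this
          have hlen' : rs.length ≤ n := by
            have h1 : rest'.length ≤ rest.length := by rw [hrest']; exact List.length_dropWhile_le _ _
            rw [hcase] at h1; simp at h1 hlen; omega
          -- the step on r from the still-open run performs exactly the best update
          have hP : pvStepA (bs, bl, i, 1 + (zs.length : Int)) ((i + 1 + zs.length), r)
              = ((pvBestStep (bs, bl) (i, (zs.length : Int) + 1)).1,
                 (pvBestStep (bs, bl) (i, (zs.length : Int) + 1)).2, -1, 0) := by
            rw [pvStepA_nonzero _ _ _ _ _ _ hr]
            by_cases hgt : 1 + (zs.length : Int) > bl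
            · rw [if_pos hgt]; simp [pvBestStep, show ((zs.length : Int) + 1 > bl) from by omega]
              omega
            · rw [if_neg hgt]; simp [pvBestStep, show ¬((zs.length : Int) + 1 > bl) from by omega]
          have hP2 : (0 : Int) ≤ (pvBestStep (bs, bl) (i, (zs.length : Int) + 1)).2 := by
            simp [pvBestStep]; split <;> simp <;> omega
          have hIH := ih rs hlen' (i + 1 + zs.length + 1)
              (pvBestStep (bs, bl) (i, (zs.length : Int) + 1)).1
              (pvBestStep (bs, bl) (i, (zs.length : Int) + 1)).2 (by omega) hP2
          rw [PySem.List.enumerate_cons, List.foldl_cons, hP, hIH]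
          have : pvRuns (i + (zs.length : Int) + 1) (r :: rs) = pvRuns (i + (zs.length : Int) + 1 + 1) rs := by
            rw [pvRuns]; simp [hr]
          rw [this]
          congr 2 <;> omega
      · -- non-compressible head: skipped on both sides
        have hz' : pvIsZeroSeg s = false := Bool.eq_false_iff.mpr hz
        have hstep : pvStepA (bs, bl, -1, 0) (i, s) = (bs, bl, -1, 0) := by
          rw [pvStepA_nonzero _ _ _ _ _ _ hz', if_neg (by omega)]
        rw [PySem.List.enumerate_cons, List.foldl_cons, hstep,
            ih rest (by simp at hlen; omega) (i + 1) bs bl (by omega) hbl]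
        rw [pvRuns]; simp [hz']

-- A's segment-cleanup loop builds exactly B's cleaned map
theorem pvA_segments (L : List String) :
    L.foldl (fun segments segment =>
      if segment == "" then segments ++ [""]
      else
        let segment := (fun t => if t == "" then "0" else t) (pvLstrip0A segment)
        segments ++ [PySem.Str.lower segment]) []
      = L.map pvCleanB := by
  have hfun : (fun (segments : List String) segment =>
      if segment == "" then segments ++ [""]
      else
        let segment := (fun t => if t == "" then "0" else t) (pvLstrip0A segment)
        segments ++ [PySem.Str.lower segment]) = fun a x => a ++ [pvCleanB x] := by
    funext a x
    by_cases h : x = "" <;> simp [h, pvCleanB, pvLstrip0A]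
  rw [hfun, pv_foldl_append_map]
  simp

-- ===== VERDICT (by name: the statement is the Claim_ definition above) =====
theorem normalize_ipv6_py_spec : Claim_equal_normalize_ipv6_py := by
  unfold Claim_equal_normalize_ipv6_py
  intro s _
  unfold Spec_normalize_ipv6_py
  unfold normalize_ipv6_py normalize_ipv6_py_alt
  by_cases hb : (PySem.Str.isIn "." s && PySem.Str.isIn "::" s) = true
  · simp only [hb, if_true]
  · simp only [Bool.not_eq_true] at hb
    simp only [hb, Bool.false_eq_true, if_false]
    rw [pvA_segments]
    set S := ((PySem.Str.split? s ":").getD []).map pvCleanB with hS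
    have hmain := pv_main S.length S (le_refl _) 0 (-1) 0 (by omega) (by omega)
    set st := (PySem.List.enumerate S 0).foldl pvStepA ((-1 : Int), (0 : Int), (-1 : Int), (0 : Int)) with hst
    set best := (pvRuns 0 S).foldl pvBestStep ((-1 : Int), (0 : Int)) with hbest
    have h1 : (if st.2.2.2 > st.2.1 then st.2.2.1 else st.1) = best.1 := by
      rw [← hmain]; simp [pvFinish]
    have h2 : (if st.2.2.2 > st.2.1 then st.2.2.2 else st.2.1) = best.2 := by
      rw [← hmain]; simp [pvFinish]
    rw [h1, h2]
    by_cases hgt : best.2 > 1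
    · simp only [hgt, if_true]
      set before := PySem.Str.join ":" (PySem.List.slice S none (some best.1)) with hbf
      set after := PySem.Str.join ":" (PySem.List.slice S (some (best.1 + best.2)) none) with haf
      by_cases h3 : before = ""
      · by_cases h4 : after = ""
        · simp [h3, h4, String.append_empty]
        · simp [h3, h4]
      · simp [h3]
    · simp only [hgt, if_false]
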